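-- pv_equiv track=rewrite | github.com/MichaelWave369/WizardWebb | app.py | unique_categories
-- ===== SOURCE A (Python) =====
-- from typing import Any, Dict, List, Optional
--
-- def unique_categories(links: List[Dict[str, Any]]) -> List[str]:
--     cats = sorted({(l.get("category") or "Other") for l in links})
--     # Put "All" is handled in UI; keep user-facing ordering nice:
--     preferred = ["Search", "Research", "OSINT", "Security & Privacy", "Web Tools", "Freebies & Deals", "Other"]
--     ordered = []
--     for p in preferred:
--         if p in cats:
--             ordered.append(p)
--     for c in cats:
--         if c not in ordered:
--             ordered.append(c)
--     return ordered
-- ===== SOURCE B (Python) =====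
-- def unique_categories(links):
--     preferred = ["Search", "Research", "OSINT", "Security & Privacy", "Web Tools", "Freebies & Deals", "Other"]
--     rank = {p: i for i, p in enumerate(preferred)}
--     cats = {(l.get("category") or "Other") for l in links}
--     return sorted(cats, key=lambda c: (rank.get(c, len(preferred)), c))
-- ===== Notes on version B (the rewrite author's own statement) =====
-- stated objective: idiomatic
-- what changed: A's two scanning passes (preferred-filter append, then membership-in-growing-output append) are replaced by one keyed sort of the category set using a rank table (rank.get(c, len(preferred)), c).
import Mathlib
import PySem

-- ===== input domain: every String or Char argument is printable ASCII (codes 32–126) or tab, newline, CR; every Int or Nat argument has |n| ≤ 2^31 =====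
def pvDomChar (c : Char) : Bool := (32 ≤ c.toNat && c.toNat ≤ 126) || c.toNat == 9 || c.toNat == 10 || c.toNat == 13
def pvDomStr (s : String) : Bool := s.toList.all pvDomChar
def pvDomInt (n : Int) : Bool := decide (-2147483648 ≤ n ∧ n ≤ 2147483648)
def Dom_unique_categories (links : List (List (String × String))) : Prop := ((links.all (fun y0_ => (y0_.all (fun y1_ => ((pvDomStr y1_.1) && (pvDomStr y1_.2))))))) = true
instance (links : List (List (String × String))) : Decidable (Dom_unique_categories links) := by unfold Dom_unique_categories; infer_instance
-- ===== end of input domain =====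

-- B replaces A's two scanning passes by a single keyed sort with a rank table (idiomatic; same results).


-- ===== PORT A =====
-- l.get("category") or "Other"   (None and the empty string are falsy)
def pvCat (l : List (String × String)) : String :=
  match (PySem.Dict.mk l).get? "category" with
  | some s => if s = "" then "Other" else s
  | none => "Other"

def pvPreferred : List String :=
  ["Search", "Research", "OSINT", "Security & Privacy", "Web Tools", "Freebies & Deals", "Other"]

def unique_categories (links : List (List (String × String))) : List String :=
  let cats := PySem.List.sorted (PySem.Set.ofList (links.map pvCat)) (fun x => x) false
  let ordered := pvPreferred.foldl (fun acc p => if p ∈ cats then acc ++ [p] else acc) []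
  cats.foldl (fun acc c => if c ∈ acc then acc else acc ++ [c]) ordered

-- ===== PORT B =====
-- rank = {p: i for i, p in enumerate(preferred)}
def pvRank : PySem.Dict String Int :=
  PySem.Dict.ofList ((PySem.List.enumerate pvPreferred 0).map (fun ip => (ip.2, ip.1)))

def unique_categories_alt (links : List (List (String × String))) : List String :=
  let cats := PySem.Set.ofList (links.map pvCat)
  PySem.List.sorted2 cats (fun c => PySem.Dict.getD pvRank c (pvPreferred.length : Int)) (fun c => c) false

-- ===== PRECONDITION & SPEC =====
def Spec_unique_categories (links : List (List (String × String))) (out : List String) : Prop := out = unique_categories_alt links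
instance (links : List (List (String × String))) (out : List String) : Decidable (Spec_unique_categories links out) := by unfold Spec_unique_categories; infer_instance

-- ===== CLAIM (what is proved, stated in full; the proofs are below) =====
def Claim_equal_unique_categories : Prop := ∀ (links : List (List (String × String))), Dom_unique_categories links → Spec_unique_categories links (unique_categories links)

-- ===== LEMMAS AND PROOFS =====

-- B's rank key
def pvK (c : String) : Int := PySem.Dict.getD pvRank c (pvPreferred.length : Int)

-- sorted2 with keys (k1, id) is sorted with the lexicographic key
lemma sorted2_eq_sorted_lex (xs : List String) (k1 : String → Int) :
    PySem.List.sorted2 xs k1 (fun c => c) false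
      = PySem.List.sorted xs (fun x => toLex (k1 x, x)) false := by
  unfold PySem.List.sorted2 PySem.List.sorted
  simp only [Bool.false_eq_true, ite_false]
  congr 1
  funext acc x
  congr 1
  funext a b
  rcases lt_trichotomy (k1 a) (k1 b) with h | h | h
  · simp [Prod.Lex.lt_iff, h, not_lt_of_gt h]
  · simp [Prod.Lex.lt_iff, h]
  · simp [Prod.Lex.lt_iff, not_lt_of_gt h, h]
    intro heq
    rw [heq] at h
    exact absurd h (lt_irrefl _)

-- A's second loop: appending the still-unseen elements of a duplicate-free list
lemma foldl_dedup_append (cats : List String) (acc0 : List String) (h : cats.Nodup) :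
    cats.foldl (fun acc c => if c ∈ acc then acc else acc ++ [c]) acc0
      = acc0 ++ cats.filter (fun c => decide (c ∉ acc0)) := by
  induction cats generalizing acc0 with
  | nil => simp
  | cons c cs ih =>
    simp only [List.nodup_cons] at h
    by_cases hc : c ∈ acc0
    · simp only [List.foldl_cons, if_pos hc, List.filter_cons, decide_eq_true_eq]
      rw [ih _ h.2]
      simp [hc]
    · simp only [List.foldl_cons, if_neg hc, List.filter_cons]
      rw [ih _ h.2]
      have : cs.filter (fun x => decide (x ∉ acc0 ++ [c])) = cs.filter (fun x => decide (x ∉ acc0)) := by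
        apply List.filter_congr
        intro x hx
        have hxc : x ≠ c := by rintro rfl; exact h.1 hx
        simp [List.mem_append, hxc]
      rw [this]
      simp [hc]

lemma pvK_lt_of_mem : ∀ a ∈ pvPreferred, pvK a < (pvPreferred.length : Int) := by decide

lemma pvK_of_not_mem (c : String) (h : c ∉ pvPreferred) : pvK c = (pvPreferred.length : Int) := by
  have h2 : pvRank.get? c = none := by
    rw [PySem.Dict.get?_eq_none_iff_not_mem_keys]
    have hk : pvRank.keys = pvPreferred := by decide
    rw [hk]; exact h
  simp [pvK, PySem.Dict.getD, h2]

lemma pvPreferred_pairwise_K : pvPreferred.Pairwise (fun a b => pvK a < pvK b) := by decide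

-- the heart: A's two passes equal B's single keyed sort, for any duplicate-free s
lemma pv_main (s : List String) (hn : s.Nodup)
    (hlt : (PySem.List.sorted s (fun x : String => x) false).Pairwise (· < ·)) :
    (PySem.List.sorted s (fun x : String => x) false).foldl
        (fun acc c => if c ∈ acc then acc else acc ++ [c])
        (pvPreferred.foldl
          (fun acc p => if p ∈ PySem.List.sorted s (fun x : String => x) false then acc ++ [p] else acc) [])
      = PySem.List.sorted2 s (fun c => pvK c) (fun c => c) false := by
  have hPerm : (PySem.List.sorted s (fun x : String => x) false).Perm s :=
    PySem.List.sorted_perm s (fun x => x) false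
  have hcnd : (PySem.List.sorted s (fun x : String => x) false).Nodup := hPerm.nodup_iff.mpr hn
  rw [PySem.List.foldl_append_ite_eq_filter, List.nil_append]
  rw [foldl_dedup_append _ _ hcnd]
  have hfc : (PySem.List.sorted s (fun x : String => x) false).filter
        (fun c => decide (c ∉ pvPreferred.filter (fun p => decide (p ∈ PySem.List.sorted s (fun x : String => x) false))))
      = (PySem.List.sorted s (fun x : String => x) false).filter (fun c => !decide (c ∈ pvPreferred)) := by
    apply List.filter_congr
    intro x hx
    have hxs : x ∈ s := by simpa [PySem.List.mem_sorted] using hx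
    simp [List.mem_filter]
    intro h'
    exact absurd hxs h'
  rw [hfc]
  rw [sorted2_eq_sorted_lex]
  symm
  apply PySem.List.sorted_eq_of_perm_of_pairwise_lt
  · -- permutation
    have h1 : (pvPreferred.filter (fun p => decide (p ∈ PySem.List.sorted s (fun x : String => x) false))).Perm
        ((PySem.List.sorted s (fun x : String => x) false).filter (fun c => decide (c ∈ pvPreferred))) := by
      rw [List.perm_ext_iff_of_nodup (List.Nodup.filter _ (by decide)) (hcnd.filter _)]
      intro a
      simp only [List.mem_filter, decide_eq_true_eq]
      exact ⟨fun ⟨h1, h2⟩ => ⟨h2, h1⟩, fun ⟨h1, h2⟩ => ⟨h2, h1⟩⟩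
    have h2 := List.filter_append_perm (fun c => decide (c ∈ pvPreferred))
      (PySem.List.sorted s (fun x : String => x) false)
    exact ((h1.append_right _).trans h2).trans hPerm
  · -- strictly increasing lex keys
    rw [List.pairwise_append]
    refine ⟨?_, ?_, ?_⟩
    · refine (pvPreferred_pairwise_K.sublist List.filter_sublist).imp ?_
      intro a b hab
      exact Prod.Lex.lt_iff.mpr (Or.inl hab)
    · refine (hlt.filter _).imp_of_mem ?_
      intro a b ha hb hab
      have ha' : a ∉ pvPreferred := by
        have := List.of_mem_filter ha; simpa using this
      have hb' : b ∉ pvPreferred := by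
        have := List.of_mem_filter hb; simpa using this
      refine Prod.Lex.lt_iff.mpr (Or.inr ⟨?_, hab⟩)
      simp [pvK_of_not_mem a ha', pvK_of_not_mem b hb']
    · intro a ha b hb
      have ha' : a ∈ pvPreferred := (List.mem_filter.mp ha).1
      have hb' : b ∉ pvPreferred := by
        have := List.of_mem_filter hb; simpa using this
      refine Prod.Lex.lt_iff.mpr (Or.inl ?_)
      rw [pvK_of_not_mem b hb']
      exact pvK_lt_of_mem a ha'

-- ===== VERDICT (by name: the statement is the Claim_ definition above) =====
theorem unique_categories_spec : Claim_equal_unique_categories := by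
  intro links _
  unfold Spec_unique_categories unique_categories unique_categories_alt
  exact pv_main (PySem.Set.ofList (links.map pvCat))
    (PySem.Set.nodup_ofList _)
    (PySem.List.sorted_ofList_pairwise_lt _)
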